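-- pv_equiv track=rewrite | github.com/devahuja811/Search-Engine-Tokenizer | rough.py | checkVowelPresence
-- ===== SOURCE A (Python) =====
-- def checkVowelPresence(word, endLength, vowels):
--     firstVowel=-2
--     firstNonVowel=-1
--     for index, char in enumerate(word[:endLength]):
--         if char in vowels:
--             firstVowel=index
--             break
--     for index, char in enumerate(word[:endLength]):
--         if char not in vowels and index>firstVowel:
--             firstNonVowel=index
--             break
--     return word[:endLength]+"ee" if firstNonVowel !=-1 else word
-- ===== SOURCE B (Python) =====
-- def checkVowelPresence(word, endLength, vowels):
--     prefix = word[:endLength]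
--     seen_vowel = False
--     found = False
--     for char in prefix:
--         if char in vowels:
--             seen_vowel = True
--         elif seen_vowel:
--             found = True
--             break
--     if not found and not seen_vowel and prefix:
--         found = True
--     return prefix + "ee" if found else word
-- ===== Notes on version B (the rewrite author's own statement) =====
-- stated objective: simpler
-- what changed: Replaces A's two sequential enumerate scans with integer index sentinels (-2/-1) by one boolean-state pass (seen_vowel/found) over the prefix.
import Mathlib
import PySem

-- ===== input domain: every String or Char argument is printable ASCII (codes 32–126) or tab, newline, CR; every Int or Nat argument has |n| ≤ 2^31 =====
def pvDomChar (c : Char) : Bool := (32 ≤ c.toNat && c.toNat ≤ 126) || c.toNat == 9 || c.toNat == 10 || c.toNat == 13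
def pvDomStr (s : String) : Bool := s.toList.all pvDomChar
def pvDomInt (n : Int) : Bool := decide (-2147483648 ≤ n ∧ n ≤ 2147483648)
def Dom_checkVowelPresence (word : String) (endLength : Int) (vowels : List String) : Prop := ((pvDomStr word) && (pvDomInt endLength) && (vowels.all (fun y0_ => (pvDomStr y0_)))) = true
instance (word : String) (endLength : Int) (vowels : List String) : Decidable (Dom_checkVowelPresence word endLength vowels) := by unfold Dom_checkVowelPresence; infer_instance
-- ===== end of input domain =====

-- B replaces A's two sequential index-sentinel scans by one boolean-state pass (simpler; same O(n) cost).

-- ===== PORT A =====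
-- first loop of A: index of the first vowel in the enumerated prefix, else the -2 sentinel
def cvpVowelLoop (vowels : List String) : List (Int × Char) → Int
  | [] => -2
  | (index, char) :: rest =>
    if vowels.contains (String.singleton char) then index
    else cvpVowelLoop vowels rest

-- second loop of A: index of the first non-vowel strictly after firstVowel, else the -1 sentinel
def cvpNonVowelLoop (vowels : List String) (firstVowel : Int) : List (Int × Char) → Int
  | [] => -1
  | (index, char) :: rest =>
    if ¬ vowels.contains (String.singleton char) = true ∧ firstVowel < index then index
    else cvpNonVowelLoop vowels firstVowel rest

def checkVowelPresence (word : String) (endLength : Int) (vowels : List String) : String :=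
  let pref := PySem.List.slice word.toList none (some endLength)
  let firstVowel := cvpVowelLoop vowels (PySem.List.enumerate pref 0)
  let firstNonVowel := cvpNonVowelLoop vowels firstVowel (PySem.List.enumerate pref 0)
  if firstNonVowel ≠ -1 then String.ofList (pref ++ "ee".toList) else word

-- ===== PORT B =====
-- B's single pass: state (seen_vowel, found), breaking when found becomes true
def cvpScan (vowels : List String) (seen : Bool) : List Char → Bool × Bool
  | [] => (seen, false)
  | char :: rest =>
    if vowels.contains (String.singleton char) then cvpScan vowels true rest
    else if seen then (seen, true)
    else cvpScan vowels seen rest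

def checkVowelPresence_alt (word : String) (endLength : Int) (vowels : List String) : String :=
  let pref := PySem.List.slice word.toList none (some endLength)
  let sf := cvpScan vowels false pref
  let found := sf.2 || (!sf.1 && !pref.isEmpty)
  if found then String.ofList (pref ++ "ee".toList) else word

-- ===== PRECONDITION & SPEC =====
def Spec_checkVowelPresence (word : String) (endLength : Int) (vowels : List String) (out : String) : Prop := out = checkVowelPresence_alt word endLength vowels
instance (word : String) (endLength : Int) (vowels : List String) (out : String) : Decidable (Spec_checkVowelPresence word endLength vowels out) := by unfold Spec_checkVowelPresence; infer_instance

-- ===== CLAIM (what is proved, stated in full; the proofs are below) =====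
def Claim_equal_checkVowelPresence : Prop := ∀ (word : String) (endLength : Int) (vowels : List String), Dom_checkVowelPresence word endLength vowels → Spec_checkVowelPresence word endLength vowels (checkVowelPresence word endLength vowels)

-- ===== LEMMAS AND PROOFS =====

theorem cvpScan_true_fst (vowels : List String) (l : List Char) :
    (cvpScan vowels true l).1 = true := by
  induction l with
  | nil => rfl
  | cons c rest ih => by_cases hc : String.singleton c ∈ vowels <;> simp [cvpScan, hc, ih]

theorem cvpScan_true_snd (vowels : List String) (l : List Char) :
    (cvpScan vowels true l).2 = l.any (fun c => !vowels.contains (String.singleton c)) := by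
  induction l with
  | nil => rfl
  | cons c rest ih => by_cases hc : String.singleton c ∈ vowels <;> simp [cvpScan, hc, ih]

theorem cvpScan_false_fst (vowels : List String) (l : List Char) :
    (cvpScan vowels false l).1 = l.any (fun c => vowels.contains (String.singleton c)) := by
  induction l with
  | nil => rfl
  | cons c rest ih =>
    by_cases hc : String.singleton c ∈ vowels <;>
      simp [cvpScan, hc, ih, cvpScan_true_fst]

theorem cvpScan_false_none (vowels : List String) (l : List Char)
    (h : l.any (fun c => vowels.contains (String.singleton c)) = false) :
    cvpScan vowels false l = (false, false) := by
  induction l with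
  | nil => rfl
  | cons c rest ih =>
    simp only [List.any_cons, Bool.or_eq_false_iff] at h
    have h1 : String.singleton c ∉ vowels := by simpa using h.1
    have h2 : (rest.any fun x => vowels.contains (String.singleton x)) = false := by
      simpa using h.2
    simp [cvpScan, h1, ih h2]

theorem cvpVowelLoop_no_vowel (vowels : List String) (l : List Char) (m : Int)
    (h : l.any (fun c => vowels.contains (String.singleton c)) = false) :
    cvpVowelLoop vowels (PySem.List.enumerate l m) = -2 := by
  induction l generalizing m with
  | nil => rfl
  | cons c rest ih =>
    simp only [List.any_cons, Bool.or_eq_false_iff] at h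
    have h1 : String.singleton c ∉ vowels := by simpa using h.1
    have h2 : (rest.any fun x => vowels.contains (String.singleton x)) = false := by
      simpa using h.2
    rw [PySem.List.enumerate_cons]
    simp only [cvpVowelLoop, List.contains_eq_mem, decide_eq_true_eq]
    rw [if_neg h1]
    exact ih (m + 1) h2

theorem cvpVowelLoop_ge (vowels : List String) (l : List Char) (m : Int)
    (h : l.any (fun c => vowels.contains (String.singleton c)) = true) :
    m ≤ cvpVowelLoop vowels (PySem.List.enumerate l m) := by
  induction l generalizing m with
  | nil => simp at h
  | cons c rest ih =>
    rw [PySem.List.enumerate_cons]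
    simp only [cvpVowelLoop, List.contains_eq_mem, decide_eq_true_eq]
    by_cases hc : String.singleton c ∈ vowels
    · rw [if_pos hc]
    · rw [if_neg hc]
      have h2 : (rest.any fun x => vowels.contains (String.singleton x)) = true := by
        simp only [List.any_cons] at h
        simpa [hc] using h
      have := ih (m + 1) h2
      omega

theorem cvpNonVowelLoop_all_gt (vowels : List String) (l : List Char) (m fv : Int)
    (hm : 0 ≤ m) (hfv : fv < m) :
    (cvpNonVowelLoop vowels fv (PySem.List.enumerate l m) ≠ -1) ↔
      l.any (fun c => !vowels.contains (String.singleton c)) = true := by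
  induction l generalizing m with
  | nil => simp [cvpNonVowelLoop, PySem.List.enumerate]
  | cons c rest ih =>
    rw [PySem.List.enumerate_cons]
    simp only [cvpNonVowelLoop, List.any_cons, List.contains_eq_mem]
    by_cases hc : String.singleton c ∈ vowels
    · rw [if_neg (by simp [hc])]
      rw [ih (m + 1) (by omega) (by omega)]
      simp [hc]
    · rw [if_pos ⟨by simp [hc], hfv⟩]
      constructor
      · intro _; simp [hc]
      · intro _; omega

theorem cvpMain (vowels : List String) (l : List Char) (m : Int) (hm : 0 ≤ m) :
    (cvpNonVowelLoop vowels (cvpVowelLoop vowels (PySem.List.enumerate l m))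
        (PySem.List.enumerate l m) ≠ -1) ↔
      ((cvpScan vowels false l).2 || (!(cvpScan vowels false l).1 && !l.isEmpty)) = true := by
  induction l generalizing m with
  | nil => simp [cvpNonVowelLoop, cvpScan, PySem.List.enumerate]
  | cons c rest ih =>
    by_cases hc : String.singleton c ∈ vowels
    · -- vowel head: A's first loop stops at m; second loop reduces to rest with all indices > m
      rw [PySem.List.enumerate_cons]
      simp only [cvpVowelLoop, List.contains_eq_mem, decide_eq_true_eq]
      rw [if_pos hc]
      simp only [cvpNonVowelLoop, List.contains_eq_mem]
      rw [if_neg (by simp [hc])]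
      rw [cvpNonVowelLoop_all_gt vowels rest (m + 1) m (by omega) (by omega)]
      simp [cvpScan, hc, cvpScan_true_fst, cvpScan_true_snd]
    · by_cases hr : rest.any (fun x => vowels.contains (String.singleton x)) = true
      · -- non-vowel head, rest has a vowel: head is skipped in both loops
        rw [PySem.List.enumerate_cons]
        simp only [cvpVowelLoop, cvpNonVowelLoop, List.contains_eq_mem, decide_eq_true_eq]
        rw [if_neg hc]
        have hge := cvpVowelLoop_ge vowels rest (m + 1) hr
        rw [if_neg (by intro hcon; omega)]
        rw [ih (m + 1) (by omega)]
        have hne : rest ≠ [] := by rintro rfl; simp at hr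
        have hfst := cvpScan_false_fst vowels rest
        simp [cvpScan, hc, hfst, hne]
      · -- the whole prefix is vowel-free: A returns index m (≠ -1); B's post-loop fix fires
        have hall : (c :: rest).any (fun x => vowels.contains (String.singleton x)) = false := by
          simp only [List.any_cons, List.contains_eq_mem, Bool.or_eq_false_iff,
            decide_eq_false_iff_not]
          exact ⟨hc, by simpa using hr⟩
        rw [cvpVowelLoop_no_vowel vowels _ m hall]
        rw [PySem.List.enumerate_cons]
        simp only [cvpNonVowelLoop, List.contains_eq_mem]
        rw [if_pos ⟨by simp [hc], by omega⟩]
        rw [cvpScan_false_none vowels _ hall]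
        simp
        omega

-- ===== VERDICT (by name: the statement is the Claim_ definition above) =====
theorem checkVowelPresence_spec : Claim_equal_checkVowelPresence := by
  intro word endLength vowels _
  unfold Spec_checkVowelPresence checkVowelPresence checkVowelPresence_alt
  have h := cvpMain vowels (PySem.List.slice word.toList none (some endLength)) 0 le_rfl
  by_cases hb : (cvpNonVowelLoop vowels
      (cvpVowelLoop vowels (PySem.List.enumerate (PySem.List.slice word.toList none (some endLength)) 0))
      (PySem.List.enumerate (PySem.List.slice word.toList none (some endLength)) 0) ≠ -1)
  · rw [if_pos hb, if_pos (h.mp hb)]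
  · rw [if_neg hb]
    rw [if_neg (by intro hh; exact hb (h.mpr hh))]
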